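-- pv_equiv track=rewrite | github.com/tylerneylon/water | water.py | drop_middle_newlines
-- ===== SOURCE A (Python) =====
-- def drop_middle_newlines(ranges, code_strs):
--   out_ranges = []
--   out_strs = []
--   for i in range(len(code_strs)):
--     code = code_strs[i]
--     pieces = [s + '\n' for s in code.split('\n')]
--     pieces[-1] = pieces[-1][:-1]
--     if code.endswith('\n'): pieces.pop()
--     out_strs += pieces
--     out_ranges += [ranges[i] for p in pieces]
--   return out_ranges, out_strs
-- ===== SOURCE B (Python) =====
-- def drop_middle_newlines(ranges, code_strs):
--   out_ranges = []
--   out_strs = []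
--   for i, code in enumerate(code_strs):
--     r = ranges[i]
--     pieces = []
--     cur = ''
--     for ch in code:
--       if ch == '\n':
--         pieces.append(cur + '\n')
--         cur = ''
--       else:
--         cur += ch
--     if cur or not pieces:
--       pieces.append(cur)
--     out_strs.extend(pieces)
--     out_ranges.extend([r] * len(pieces))
--   return out_ranges, out_strs
-- ===== Notes on version B (the rewrite author's own statement) =====
-- stated objective: alternative
-- what changed: Replaces split('\n') followed by per-piece newline re-appending, last-piece truncation and conditional pop with a single character-level scan that builds each line (newline included) in an accumulator and closes it on '\n', appending a final piece only when the remainder is non-empty or no piece exists.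
import Mathlib
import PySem

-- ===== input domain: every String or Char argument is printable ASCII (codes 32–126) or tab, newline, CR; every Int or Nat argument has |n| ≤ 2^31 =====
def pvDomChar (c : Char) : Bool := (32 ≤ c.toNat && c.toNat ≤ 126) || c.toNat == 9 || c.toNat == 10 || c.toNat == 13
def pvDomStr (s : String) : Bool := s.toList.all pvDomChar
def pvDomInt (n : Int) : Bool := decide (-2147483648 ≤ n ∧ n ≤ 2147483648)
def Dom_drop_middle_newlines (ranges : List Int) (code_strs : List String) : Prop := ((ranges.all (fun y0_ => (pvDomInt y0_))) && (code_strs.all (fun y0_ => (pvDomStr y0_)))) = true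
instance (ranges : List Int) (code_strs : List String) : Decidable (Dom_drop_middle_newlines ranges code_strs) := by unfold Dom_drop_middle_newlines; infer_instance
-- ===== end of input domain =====

-- B replaces A's split('\n')-then-fixup (re-append '\n' to every piece, truncate the last, pop it if the
-- string ends in '\n') with a single character-level scan per string; same cost, a different decomposition.

-- ===== PORT A =====
-- per-string body of A's loop: pieces = [s+'\n' for s in code.split('\n')]; pieces[-1] = pieces[-1][:-1];
-- if code.endswith('\n'): pieces.pop()
def pvPiecesA (code : List Char) : List (List Char) :=
  -- code.split('\n'): "\n".toList = ['\n'], exact via PySem.Chars.splitOn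
  let parts := PySem.Chars.splitOn code ['\n']
  let pieces := parts.map (fun s => s ++ ['\n'])
  -- pieces[-1] = pieces[-1][:-1]: pieces is nonempty (split never returns []), [:-1] drops the last char
  let pieces2 := pieces.dropLast ++ [(pieces.getLastD []).dropLast]
  if PySem.Chars.endswith code ['\n'] then pieces2.dropLast else pieces2

def drop_middle_newlines (ranges : List Int) (code_strs : List String) : List Int × List String :=
  -- for i in range(len(code_strs)): … out_strs += pieces; out_ranges += [ranges[i] for p in pieces]
  (PySem.List.pyRange 0 (PySem.List.len code_strs)).foldl
    (fun acc i =>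
      let code := (PySem.List.pyGetD code_strs i "").toList
      let pieces := pvPiecesA code
      (acc.1 ++ pieces.map (fun _ => PySem.List.pyGetD ranges i 0),
       acc.2 ++ pieces.map (fun cs => String.ofList cs)))
    ([], [])

-- ===== PORT B =====
-- inner character loop of B: close the current piece on '\n', otherwise extend it
def pvScanStep (st : List (List Char) × List Char) (c : Char) : List (List Char) × List Char :=
  if c = '\n' then (st.1 ++ [st.2 ++ ['\n']], []) else (st.1, st.2 ++ [c])

-- per-string body of B: scan, then 'if cur or not pieces: pieces.append(cur)'
def pvPiecesB (code : List Char) : List (List Char) :=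
  let st := code.foldl pvScanStep ([], [])
  if st.2 ≠ [] ∨ st.1 = [] then st.1 ++ [st.2] else st.1

def drop_middle_newlines_alt (ranges : List Int) (code_strs : List String) : List Int × List String :=
  -- for i, code in enumerate(code_strs): r = ranges[i]; … out_strs.extend(pieces); out_ranges.extend([r]*len(pieces))
  (PySem.List.enumerate code_strs).foldl
    (fun acc ic =>
      let r := PySem.List.pyGetD ranges ic.1 0
      let pieces := pvPiecesB ic.2.toList
      (acc.1 ++ List.replicate pieces.length r,
       acc.2 ++ pieces.map (fun cs => String.ofList cs)))
    ([], [])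

-- ===== PRECONDITION & SPEC =====
-- A evaluates ranges[i] for every index of code_strs (each string yields at least one piece), so it
-- raises IndexError iff code_strs is longer than ranges; exactly those crash inputs are excluded (B raises there too).
def Pre_drop_middle_newlines (ranges : List Int) (code_strs : List String) : Prop :=
  code_strs.length ≤ ranges.length
instance (ranges : List Int) (code_strs : List String) : Decidable (Pre_drop_middle_newlines ranges code_strs) := by unfold Pre_drop_middle_newlines; infer_instance

def pvWitness_drop_middle_newlines : List Int × List String := ([3, 7], ["a\nb"])

def Spec_drop_middle_newlines (ranges : List Int) (code_strs : List String) (out : List Int × List String) : Prop := out = drop_middle_newlines_alt ranges code_strs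
instance (ranges : List Int) (code_strs : List String) (out : List Int × List String) : Decidable (Spec_drop_middle_newlines ranges code_strs out) := by unfold Spec_drop_middle_newlines; infer_instance

-- ===== CLAIM (what is proved, stated in full; the proofs are below) =====
def Claim_equal_drop_middle_newlines : Prop := ∀ (ranges : List Int) (code_strs : List String), Dom_drop_middle_newlines ranges code_strs → Pre_drop_middle_newlines ranges code_strs → Spec_drop_middle_newlines ranges code_strs (drop_middle_newlines ranges code_strs)

-- ===== LEMMAS AND PROOFS =====

-- reference splitter: code.split('\n') as a structural recursion
def pvSplitNL : List Char → List (List Char)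
  | [] => [[]]
  | c :: t => if c = '\n' then [] :: pvSplitNL t else (pvSplitNL t).modifyHead (c :: ·)

-- reference line list: every line keeps its '\n'; a (possibly empty) trailing remainder is last
def pvLinesAll : List Char → List (List Char)
  | [] => [[]]
  | c :: t => if c = '\n' then ['\n'] :: pvLinesAll t else (pvLinesAll t).modifyHead (c :: ·)

theorem pvSplitNL_ne_nil (l : List Char) : pvSplitNL l ≠ [] := by
  induction l with
  | nil => simp [pvSplitNL]
  | cons c t ih =>
    simp only [pvSplitNL]
    split_ifs <;> simp_all [List.modifyHead_eq_nil_iff]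

theorem pvLinesAll_ne_nil (l : List Char) : pvLinesAll l ≠ [] := by
  induction l with
  | nil => simp [pvLinesAll]
  | cons c t ih =>
    simp only [pvLinesAll]
    split_ifs <;> simp_all [List.modifyHead_eq_nil_iff]

theorem pv_go_eq (l : List Char) : ∀ (fuel : Nat) (cur : List Char) (acc : List (List Char)),
    l.length < fuel →
    PySem.Chars.splitOn.go ['\n'] fuel l cur acc
      = acc.reverse ++ (pvSplitNL l).modifyHead (cur.reverse ++ ·) := by
  induction l with
  | nil =>
    intro fuel cur acc h
    match fuel with
    | f + 1 => simp [PySem.Chars.splitOn.go, pvSplitNL]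
  | cons c t ih =>
    intro fuel cur acc h
    match fuel with
    | f + 1 =>
      simp only [PySem.Chars.splitOn.go]
      by_cases hc : c = '\n'
      · subst hc
        rw [if_pos (by simp)]
        simp only [List.length_cons, List.drop_succ_cons, List.length_nil, List.drop_zero]
        rw [ih f [] (cur.reverse :: acc) (by simpa using h)]
        rcases hS : pvSplitNL t with _ | ⟨s, ss⟩
        · exact absurd hS (pvSplitNL_ne_nil t)
        · simp [pvSplitNL, hS]
      · rw [if_neg (by simp [Ne.symm hc])]
        rw [ih f (c :: cur) acc (by simpa using Nat.lt_of_succ_lt_succ h)]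
        rcases hS : pvSplitNL t with _ | ⟨s, ss⟩
        · exact absurd hS (pvSplitNL_ne_nil t)
        · simp [pvSplitNL, hc, hS]

theorem pv_splitOn_eq (l : List Char) : PySem.Chars.splitOn l ['\n'] = pvSplitNL l := by
  rw [PySem.Chars.splitOn, pv_go_eq l (l.length + 1) [] [] (by omega)]
  rcases hS : pvSplitNL l with _ | ⟨s, ss⟩
  · exact absurd hS (pvSplitNL_ne_nil l)
  · simp

theorem pv_getLastD_irrel {α : Type} (l : List α) (h : l ≠ []) (d1 d2 : α) :
    l.getLastD d1 = l.getLastD d2 := by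
  obtain ⟨x, hx⟩ := Option.isSome_iff_exists.mp (List.getLast?_isSome.mpr h)
  simp [List.getLastD_eq_getLast?, hx]

theorem pv_bridge (l : List Char) :
    (pvSplitNL l).dropLast.map (fun s => s ++ ['\n']) ++ [(pvSplitNL l).getLastD []] = pvLinesAll l := by
  induction l with
  | nil => simp [pvSplitNL, pvLinesAll]
  | cons c t ih =>
    rcases hS : pvSplitNL t with _ | ⟨s, ss⟩
    · exact absurd hS (pvSplitNL_ne_nil t)
    rw [hS] at ih
    by_cases hc : c = '\n'
    · subst hc
      simp only [pvSplitNL, pvLinesAll, hS, if_true]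
      rw [List.dropLast_cons₂, List.map_cons, List.getLastD_cons]
      simpa using ih
    · simp only [pvSplitNL, pvLinesAll, if_neg hc, hS, List.modifyHead_cons]
      rcases ss with _ | ⟨s2, ss2⟩
      · simpa using ih.symm ▸ (by simp : (List.modifyHead (c :: ·) [s] : List (List Char)) = [c :: s])
      · rw [List.dropLast_cons₂, List.map_cons] at ih ⊢
        rw [List.getLastD_cons, pv_getLastD_irrel (s2 :: ss2) (by simp) s []] at ih
        rw [List.getLastD_cons, pv_getLastD_irrel (s2 :: ss2) (by simp) (c :: s) []]
        rw [← ih]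
        simp

theorem pv_length_linesAll (l : List Char) : (pvLinesAll l).length = l.count '\n' + 1 := by
  induction l with
  | nil => simp [pvLinesAll]
  | cons c t ih =>
    simp only [pvLinesAll]
    by_cases hc : c = '\n'
    · subst hc; simp [ih]
    · simp [hc, ih]

theorem pv_key (l : List Char) :
    (pvLinesAll l).getLastD [] = [] ↔ (l = [] ∨ ['\n'] <:+ l) := by
  induction l with
  | nil => simp [pvLinesAll]
  | cons c t ih =>
    rcases hS : pvLinesAll t with _ | ⟨s, ss⟩
    · exact absurd hS (pvLinesAll_ne_nil t)
    rw [hS] at ih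
    have hcount := pv_length_linesAll t
    rw [hS] at hcount
    by_cases hc : c = '\n'
    · subst hc
      simp only [pvLinesAll, if_true, hS, List.getLastD_cons, List.suffix_cons_iff]
      simp only [List.getLastD_cons] at ih
      rw [ih]
      constructor
      · rintro (h | h)
        · subst h; exact Or.inr (Or.inl rfl)
        · exact Or.inr (Or.inr h)
      · rintro (h | h | h)
        · cases h
        · injection h with _ h2; exact Or.inl h2.symm
        · exact Or.inr h
    · simp only [pvLinesAll, if_neg hc, hS, List.modifyHead_cons, List.suffix_cons_iff]
      rcases ss with _ | ⟨s2, ss2⟩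
      · have hnl : '\n' ∉ t := by
          intro hmem
          have := List.count_pos_iff.mpr hmem
          simp at hcount; omega
        simp only [List.getLastD_cons, List.getLastD_nil]
        constructor
        · intro h; exact absurd h (by simp)
        · rintro (h | h | h)
          · cases h
          · injection h with h1 _; exact (hc h1.symm).elim
          · exact (hnl (h.subset (by simp))).elim
      · have ht : t ≠ [] := by
          intro h; subst h; simp [pvLinesAll] at hS
        simp only [List.getLastD_cons] at ih ⊢
        rw [ih]
        constructor
        · rintro (h | h)
          · exact absurd h ht
          · exact Or.inr (Or.inr h)
        · rintro (h | h | h)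
          · cases h
          · injection h with h1 _; exact (hc h1.symm).elim
          · exact Or.inr h

theorem pv_modifyHead_comp {α : Type} (f g : α → α) (l : List α) :
    (l.modifyHead g).modifyHead f = l.modifyHead (fun x => f (g x)) := by
  cases l <;> simp

theorem pv_dropLast_getLastD {α : Type} (l : List α) (h : l ≠ []) (d : α) :
    l.dropLast ++ [l.getLastD d] = l := by
  induction l generalizing d with
  | nil => exact absurd rfl h
  | cons a t ih =>
    rcases t with _ | ⟨b, t'⟩
    · simp
    · rw [List.dropLast_cons₂, List.getLastD_cons, List.cons_append, ih (by simp) a]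

theorem pv_fix_map (S : List (List Char)) (h : S ≠ []) :
    (S.map (fun s => s ++ ['\n'])).dropLast ++ [((S.map (fun s => s ++ ['\n'])).getLastD []).dropLast]
    = S.dropLast.map (fun s => s ++ ['\n']) ++ [S.getLastD []] := by
  induction S with
  | nil => exact absurd rfl h
  | cons s ss ih =>
    rcases ss with _ | ⟨s2, ss2⟩
    · simp
    · have hih := ih (by simp)
      simp only [List.map_cons, List.dropLast_cons₂, List.getLastD_eq_getLast?,
        List.getLast?_cons_cons, List.cons_append] at hih ⊢
      rw [hih]

theorem pv_piecesA_eq (l : List Char) :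
    pvPiecesA l = if ['\n'] <:+ l then (pvLinesAll l).dropLast else pvLinesAll l := by
  have hmid : ((pvSplitNL l).map (fun s => s ++ ['\n'])).dropLast
      ++ [(((pvSplitNL l).map (fun s => s ++ ['\n'])).getLastD []).dropLast] = pvLinesAll l := by
    rw [pv_fix_map (pvSplitNL l) (pvSplitNL_ne_nil l), pv_bridge l]
  unfold pvPiecesA
  rw [pv_splitOn_eq]
  by_cases hsf : ['\n'] <:+ l
  · rw [if_pos (by rw [PySem.Chars.endswith_iff]; exact hsf), if_pos hsf]
    simp only [hmid]
  · rw [if_neg (by rw [PySem.Chars.endswith_iff]; exact hsf), if_neg hsf]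
    simp only [hmid]

theorem pv_fold_inv (l : List Char) : ∀ (P : List (List Char)) (cur : List Char),
    l.foldl pvScanStep (P, cur)
      = (P ++ ((pvLinesAll l).modifyHead (fun x => cur ++ x)).dropLast,
         ((pvLinesAll l).modifyHead (fun x => cur ++ x)).getLastD []) := by
  induction l with
  | nil => intro P cur; simp [pvLinesAll]
  | cons c t ih =>
    intro P cur
    rw [List.foldl_cons]
    by_cases hc : c = '\n'
    · subst hc
      simp only [pvScanStep, if_true]
      rw [ih]
      have hmod : (pvLinesAll t).modifyHead (fun x => ([] : List Char) ++ x) = pvLinesAll t := by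
        cases h : pvLinesAll t <;> simp
      rw [hmod]
      simp only [pvLinesAll, if_true, List.modifyHead_cons]
      rw [List.dropLast_cons_of_ne_nil (pvLinesAll_ne_nil t), List.getLastD_cons,
          pv_getLastD_irrel (pvLinesAll t) (pvLinesAll_ne_nil t) (cur ++ ['\n']) []]
      simp
    · simp only [pvScanStep, if_neg hc]
      rw [ih]
      simp only [pvLinesAll, if_neg hc, pv_modifyHead_comp]
      have : (fun x => cur ++ c :: x) = (fun x => (cur ++ [c]) ++ x) := funext (by simp)
      rw [this]

theorem pv_piecesB_eq (l : List Char) : pvPiecesB l = pvPiecesA l := by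
  unfold pvPiecesB
  rw [pv_fold_inv l [] []]
  have hmod : (pvLinesAll l).modifyHead (fun x => ([] : List Char) ++ x) = pvLinesAll l := by
    cases h : pvLinesAll l <;> simp
  rw [hmod, pv_piecesA_eq]
  by_cases hsf : ['\n'] <:+ l
  · have hcur : (pvLinesAll l).getLastD [] = [] := (pv_key l).mpr (Or.inr hsf)
    have hlen : 2 ≤ (pvLinesAll l).length := by
      have hm : '\n' ∈ l := hsf.subset (by simp)
      have := List.count_pos_iff.mpr hm
      rw [pv_length_linesAll l]; omega
    have hps : (pvLinesAll l).dropLast ≠ [] := by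
      intro h
      have := congrArg List.length h
      simp [List.length_dropLast] at this; omega
    rw [List.getLastD_eq_getLast?] at hcur
    rw [if_pos hsf]
    simp [hcur, hps]
  · rw [if_neg hsf]
    by_cases hcur : (pvLinesAll l).getLastD [] = []
    · have hl : l = [] := by
        rcases (pv_key l).mp hcur with h | h
        · exact h
        · exact absurd h hsf
      subst hl
      simp [pvLinesAll]
    · have hdg := pv_dropLast_getLastD (pvLinesAll l) (pvLinesAll_ne_nil l) []
      rw [List.getLastD_eq_getLast?] at hcur hdg
      simp [hcur, hdg]

theorem pv_final (ranges : List Int) (code_strs : List String) :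
    drop_middle_newlines ranges code_strs = drop_middle_newlines_alt ranges code_strs := by
  unfold drop_middle_newlines drop_middle_newlines_alt
  rw [PySem.List.enumerate_eq_map_pyRange code_strs "", List.foldl_map]
  simp only [pv_piecesB_eq, List.map_const']

-- ===== VERDICT (by name: the statement is the Claim_ definition above) =====
theorem drop_middle_newlines_spec : Claim_equal_drop_middle_newlines := by
  intro ranges code_strs _hdom _hpre
  unfold Spec_drop_middle_newlines
  exact pv_final ranges code_strs
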